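-- pv_equiv track=rewrite | github.com/mickeykkim/inky_pi | inky_pi/train/train_control.py | _abbreviate_station_name
-- ===== SOURCE A (Python) =====
-- from typing import Dict
--
-- def _abbreviate_station_name(station_name: str) -> str:
--     """Abbreviate station name by shortening words like street, lane, etc.
--
--     Args:
--         station_name (str): Station name
--
--     Returns:
--         str: Abbreviated station name
--     """
--     abbreviation_dict: Dict[str, str] = {
--         "Street": "St",
--         "Lane": "Ln",
--         "Court": "Ct",
--         "Road": "Rd",
--         "North": "N",
--         "South": "S",
--         "East": "E",
--         "West": "W",
--         "Thameslink": "TL",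
--     }
--     for key, value in abbreviation_dict.items():
--         station_name = station_name.replace(key, value)
--
--     return station_name
-- ===== SOURCE B (Python) =====
-- def _abbreviate_station_name(station_name: str) -> str:
--     """Abbreviate station name by shortening words like street, lane, etc.
--
--     Single left-to-right scan: at each position the first matching table key
--     (in table order) is replaced by its abbreviation, otherwise the character
--     is copied unchanged.
--     """
--     table = [
--         ("Street", "St"), ("Lane", "Ln"), ("Court", "Ct"), ("Road", "Rd"),
--         ("North", "N"), ("South", "S"), ("East", "E"), ("West", "W"),
--         ("Thameslink", "TL"),
--     ]
--     out = []
--     i = 0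
--     n = len(station_name)
--     while i < n:
--         for key, value in table:
--             if station_name.startswith(key, i):
--                 out.append(value)
--                 i += len(key)
--                 break
--         else:
--             out.append(station_name[i])
--             i += 1
--     return "".join(out)
-- ===== Notes on version B (the rewrite author's own statement) =====
-- stated objective: alternative
-- what changed: A makes nine sequential full-string replace passes (one per dict entry); B makes a single left-to-right scan that at each position tries the abbreviation table in order, emits the value at the first matching key and otherwise copies the character.
import Mathlib
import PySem

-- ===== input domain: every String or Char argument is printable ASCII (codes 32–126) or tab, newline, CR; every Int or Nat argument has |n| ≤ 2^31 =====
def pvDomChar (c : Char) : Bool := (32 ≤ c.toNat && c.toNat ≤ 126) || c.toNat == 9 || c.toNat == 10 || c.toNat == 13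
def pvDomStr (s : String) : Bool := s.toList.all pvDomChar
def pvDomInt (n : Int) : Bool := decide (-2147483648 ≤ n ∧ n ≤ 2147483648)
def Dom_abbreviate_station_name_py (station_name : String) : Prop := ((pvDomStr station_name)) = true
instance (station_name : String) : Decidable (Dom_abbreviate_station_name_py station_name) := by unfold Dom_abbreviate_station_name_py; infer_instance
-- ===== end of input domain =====

-- B replaces A's nine sequential full-string replace passes by one left-to-right scan with a
-- first-match abbreviation table (objective: alternative, single pass instead of nine).

-- ===== PORT A =====
def abbreviate_station_name_py (station_name : String) : String :=
  let abbreviation_dict : List (String × String) :=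
    [("Street", "St"), ("Lane", "Ln"), ("Court", "Ct"), ("Road", "Rd"), ("North", "N"),
     ("South", "S"), ("East", "E"), ("West", "W"), ("Thameslink", "TL")]
  abbreviation_dict.foldl (fun sn kv => PySem.Str.replace sn kv.1 kv.2) station_name

-- ===== PORT B =====
-- B's abbreviation table (dict order), over code points
def pvAbbrevTable : List (List Char × List Char) :=
  [("Street".toList, "St".toList), ("Lane".toList, "Ln".toList), ("Court".toList, "Ct".toList),
   ("Road".toList, "Rd".toList), ("North".toList, "N".toList), ("South".toList, "S".toList),
   ("East".toList, "E".toList), ("West".toList, "W".toList), ("Thameslink".toList, "TL".toList)]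

-- first table entry whose key is a prefix of s (Source B's inner for/startswith loop)
def pvFindMatch : List (List Char × List Char) → List Char → Option (List Char × List Char)
  | [], _ => none
  | kv :: rest, s => if kv.1.isPrefixOf s then some kv else pvFindMatch rest s

-- Source B's while loop: one left-to-right scan, emitting the value at each key match
def pvScan (kvs : List (List Char × List Char)) : List Char → List Char
  | [] => []
  | c :: t =>
    match pvFindMatch kvs (c :: t) with
    | some kv => kv.2 ++ pvScan kvs (t.drop (kv.1.length - 1))
    | none => c :: pvScan kvs t
termination_by s => s.length
decreasing_by
  · simp only [List.length_drop, List.length_cons]; omega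
  · simp only [List.length_cons]; omega

def abbreviate_station_name_py_alt (station_name : String) : String :=
  String.ofList (pvScan pvAbbrevTable station_name.toList)

-- ===== PRECONDITION & SPEC =====
def Spec_abbreviate_station_name_py (station_name : String) (out : String) : Prop := out = abbreviate_station_name_py_alt station_name
instance (station_name : String) (out : String) : Decidable (Spec_abbreviate_station_name_py station_name out) := by unfold Spec_abbreviate_station_name_py; infer_instance

-- ===== CLAIM (what is proved, stated in full; the proofs are below) =====
def Claim_equal_abbreviate_station_name_py : Prop := ∀ (station_name : String), Dom_abbreviate_station_name_py station_name → Spec_abbreviate_station_name_py station_name (abbreviate_station_name_py station_name)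

-- ===== LEMMAS AND PROOFS =====

-- simple structural form of Python's str.replace (old ≠ []): scan, emit new at each match
def pvRepl (old new : List Char) : List Char → List Char
  | [] => []
  | c :: t =>
    if old.isPrefixOf (c :: t) then new ++ pvRepl old new (t.drop (old.length - 1))
    else c :: pvRepl old new t
termination_by s => s.length
decreasing_by
  · simp only [List.length_drop, List.length_cons]; omega
  · simp only [List.length_cons]; omega

theorem pvRepl_nil (old new : List Char) : pvRepl old new [] = [] := by
  simp [pvRepl]

theorem pvRepl_cons_pos (old new : List Char) (c : Char) (t : List Char)
    (h : old <+: c :: t) :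
    pvRepl old new (c :: t) = new ++ pvRepl old new (t.drop (old.length - 1)) := by
  rw [pvRepl]
  simp [List.isPrefixOf_iff_prefix.mpr h]

theorem pvRepl_cons_neg (old new : List Char) (c : Char) (t : List Char)
    (h : ¬ old <+: c :: t) :
    pvRepl old new (c :: t) = c :: pvRepl old new t := by
  rw [pvRepl, if_neg (fun hh => h (List.isPrefixOf_iff_prefix.mp hh))]

theorem pvGo_eq (old new : List Char) (hold : old ≠ []) :
    ∀ (fuel : Nat) (l acc : List Char), l.length ≤ fuel →
      PySem.Chars.replace.go old new fuel l acc = acc.reverse ++ pvRepl old new l := by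
  have holdlen : 1 ≤ old.length := by
    cases old with
    | nil => exact absurd rfl hold
    | cons a l => simp
  intro fuel
  induction fuel with
  | zero =>
    intro l acc hl
    have : l = [] := List.eq_nil_of_length_eq_zero (Nat.le_zero.mp hl)
    subst this
    rw [PySem.Chars.replace.go, pvRepl_nil]
  | succ f ih =>
    intro l acc hl
    cases l with
    | nil =>
      rw [PySem.Chars.replace.go, pvRepl_nil]
      · simp
      · omega
    | cons c t =>
      rw [PySem.Chars.replace.go]
      by_cases hp : old.isPrefixOf (c :: t)
      · rw [if_pos hp]
        have hdrop : List.drop old.length (c :: t) = t.drop (old.length - 1) := by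
          cases old with
          | nil => exact absurd rfl hold
          | cons a l => simp
        have hlen : (List.drop old.length (c :: t)).length ≤ f := by
          simp only [List.length_drop, List.length_cons] at *
          omega
        rw [ih _ _ hlen, pvRepl_cons_pos _ _ _ _ (List.isPrefixOf_iff_prefix.mp hp), hdrop]
        simp
      · rw [if_neg hp,
          ih _ _ (by simp only [List.length_cons] at hl; omega),
          pvRepl_cons_neg _ _ _ _ (fun hh => hp (List.isPrefixOf_iff_prefix.mpr hh))]
        simp

theorem pvReplace_eq (old new s : List Char) (hold : old ≠ []) :
    PySem.Chars.replace s old new = pvRepl old new s := by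
  unfold PySem.Chars.replace
  rw [if_neg (fun hh => hold (List.isEmpty_iff.mp hh))]
  simpa using pvGo_eq old new hold s.length s [] le_rfl

-- k can match somewhere in w ++ X only if k and w compare as prefixes
theorem pvPrefix_append_cases {k w X : List Char} (h : k <+: w ++ X) :
    k <+: w ∨ w <+: k :=
  List.prefix_or_prefix_of_prefix h (List.prefix_append w X)

theorem pvRepl_append (k v : List Char) :
    ∀ (w : List Char), (∀ j < w.length, ¬ (k <+: w.drop j) ∧ ¬ (w.drop j <+: k)) →
    ∀ X, pvRepl k v (w ++ X) = w ++ pvRepl k v X := by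
  intro w
  induction w with
  | nil => intro _ X; simp
  | cons c w' ih =>
    intro hw X
    have h0 := hw 0 (by simp)
    simp only [List.drop_zero] at h0
    have hnp : ¬ k <+: c :: (w' ++ X) := by
      intro hkp
      have hkp' : k <+: (c :: w') ++ X := by simpa using hkp
      rcases pvPrefix_append_cases hkp' with h1 | h1
      · exact h0.1 h1
      · exact h0.2 h1
    rw [List.cons_append, pvRepl_cons_neg _ _ _ _ hnp,
      ih (fun j hj => by
        simpa using hw (j + 1) (by simp only [List.length_cons]; omega)) X]
    simp

theorem pvFindMatch_some {kvs : List (List Char × List Char)} {s : List Char}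
    {kv : List Char × List Char} (h : pvFindMatch kvs s = some kv) :
    kv ∈ kvs ∧ kv.1 <+: s := by
  induction kvs with
  | nil => simp [pvFindMatch] at h
  | cons p rest ih =>
    rw [pvFindMatch] at h
    by_cases hp : p.1.isPrefixOf s
    · simp [hp] at h
      subst h
      exact ⟨List.mem_cons_self, List.isPrefixOf_iff_prefix.mp hp⟩
    · simp [hp] at h
      obtain ⟨h1, h2⟩ := ih h
      exact ⟨List.mem_cons_of_mem _ h1, h2⟩

theorem pvFindMatch_none {kvs : List (List Char × List Char)} {s : List Char}
    (h : ∀ kv ∈ kvs, ¬ kv.1 <+: s) : pvFindMatch kvs s = none := by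
  induction kvs with
  | nil => rfl
  | cons p rest ih =>
    rw [pvFindMatch]
    have : ¬ p.1.isPrefixOf s := by
      simpa [List.isPrefixOf_iff_prefix] using h p List.mem_cons_self
    simp [this]
    exact ih fun kv hkv => h kv (List.mem_cons_of_mem _ hkv)

theorem pvFindMatch_append (l₁ l₂ : List (List Char × List Char)) (s : List Char) :
    pvFindMatch (l₁ ++ l₂) s =
      match pvFindMatch l₁ s with
      | some kv => some kv
      | none => pvFindMatch l₂ s := by
  induction l₁ with
  | nil => simp [pvFindMatch]
  | cons q rest ih =>
    simp only [List.cons_append, pvFindMatch]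
    by_cases hq : q.1.isPrefixOf s <;> simp [hq, ih]

theorem pvScan_nil (kvs : List (List Char × List Char)) : pvScan kvs [] = [] := by
  simp [pvScan]

theorem pvScan_cons_some {kvs : List (List Char × List Char)} {c : Char} {t : List Char}
    {kv : List Char × List Char} (h : pvFindMatch kvs (c :: t) = some kv) :
    pvScan kvs (c :: t) = kv.2 ++ pvScan kvs (t.drop (kv.1.length - 1)) := by
  rw [pvScan, h]

theorem pvScan_cons_none {kvs : List (List Char × List Char)} {c : Char} {t : List Char}
    (h : pvFindMatch kvs (c :: t) = none) :
    pvScan kvs (c :: t) = c :: pvScan kvs t := by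
  rw [pvScan, h]

-- c neither begins a key nor a value of the table
def pvNeutral (kvs : List (List Char × List Char)) (c : Char) : Prop :=
  ∀ kv ∈ kvs, kv.1.head? ≠ some c ∧ kv.2.head? ≠ some c

-- the scan copies a block of neutral characters unchanged
theorem pvScan_neutral_append (kvs : List (List Char × List Char))
    (hkeys : ∀ kv ∈ kvs, kv.1 ≠ []) :
    ∀ (p u : List Char), (∀ c ∈ p, pvNeutral kvs c) →
      pvScan kvs (p ++ u) = p ++ pvScan kvs u := by
  intro p
  induction p with
  | nil => intro u _; simp
  | cons c p' ih =>
    intro u hp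
    have hnone : pvFindMatch kvs (c :: (p' ++ u)) = none := by
      apply pvFindMatch_none
      intro kv hkv hpre
      cases hk1 : kv.1 with
      | nil => exact hkeys kv hkv hk1
      | cons a l =>
        rw [hk1, List.cons_prefix_cons] at hpre
        have := (hp c List.mem_cons_self kv hkv).1
        rw [hk1, List.head?_cons, hpre.1] at this
        exact this rfl
    rw [List.cons_append, pvScan_cons_none hnone,
      ih u (fun d hd => hp d (List.mem_cons_of_mem _ hd))]
    simp

-- a neutral string is a prefix of the scan's output only if it was a prefix of the input
theorem pvScan_prefix_neutral (kvs : List (List Char × List Char))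
    (hvals : ∀ kv ∈ kvs, kv.2 ≠ []) :
    ∀ (t p : List Char), (∀ c ∈ p, pvNeutral kvs c) →
      p <+: pvScan kvs t → p <+: t := by
  suffices H : ∀ n, ∀ t : List Char, t.length ≤ n → ∀ p : List Char,
      (∀ c ∈ p, pvNeutral kvs c) → p <+: pvScan kvs t → p <+: t by
    exact fun t p hp h => H t.length t le_rfl p hp h
  intro n
  induction n with
  | zero =>
    intro t ht p _ hpre
    have : t = [] := List.eq_nil_of_length_eq_zero (Nat.le_zero.mp ht)
    subst this
    rw [pvScan_nil] at hpre
    simpa using hpre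
  | succ n ih =>
    intro t ht p hp hpre
    cases t with
    | nil =>
      rw [pvScan_nil] at hpre
      simpa using hpre
    | cons c t' =>
      cases p with
      | nil => exact List.nil_prefix
      | cons d p' =>
        cases hm : pvFindMatch kvs (c :: t') with
        | some kv =>
          rw [pvScan_cons_some hm] at hpre
          obtain ⟨hmem, _⟩ := pvFindMatch_some hm
          exfalso
          cases hv : kv.2 with
          | nil => exact hvals kv hmem hv
          | cons e v' =>
            rw [hv, List.cons_append, List.cons_prefix_cons] at hpre
            have := (hp d List.mem_cons_self kv hmem).2
            rw [hv, List.head?_cons, hpre.1] at this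
            exact this rfl
        | none =>
          rw [pvScan_cons_none hm, List.cons_prefix_cons] at hpre
          rw [List.cons_prefix_cons]
          refine ⟨hpre.1, ih t' (by simp only [List.length_cons] at ht; omega) p'
            (fun e he => hp e (List.mem_cons_of_mem _ he)) hpre.2⟩

-- one more replace pass over the scan of the earlier keys = the scan with the key appended
theorem pvStep (kvs : List (List Char × List Char)) (k v : List Char)
    (hk : k ≠ [])
    (hkeys : ∀ kv ∈ kvs, kv.1 ≠ []) (hvals : ∀ kv ∈ kvs, kv.2 ≠ [])
    (hpre : ∀ kv ∈ kvs, ¬ (k <+: kv.1) ∧ ¬ (kv.1 <+: k))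
    (hval : ∀ kv ∈ kvs, ∀ j < kv.2.length, ¬ (k <+: kv.2.drop j) ∧ ¬ (kv.2.drop j <+: k))
    (htail : ∀ c ∈ k.drop 1, pvNeutral kvs c) :
    ∀ s, pvRepl k v (pvScan kvs s) = pvScan (kvs ++ [(k, v)]) s := by
  suffices H : ∀ n, ∀ s : List Char, s.length ≤ n →
      pvRepl k v (pvScan kvs s) = pvScan (kvs ++ [(k, v)]) s by
    exact fun s => H s.length s le_rfl
  intro n
  induction n with
  | zero =>
    intro s hs
    have : s = [] := List.eq_nil_of_length_eq_zero (Nat.le_zero.mp hs)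
    subst this
    rw [pvScan_nil, pvScan_nil, pvRepl_nil]
  | succ n ih =>
    intro s hs
    cases s with
    | nil => rw [pvScan_nil, pvScan_nil, pvRepl_nil]
    | cons c t =>
      cases hm : pvFindMatch kvs (c :: t) with
      | some kv =>
        obtain ⟨hmem, _⟩ := pvFindMatch_some hm
        have hm' : pvFindMatch (kvs ++ [(k, v)]) (c :: t) = some kv := by
          rw [pvFindMatch_append, hm]
        rw [pvScan_cons_some hm, pvScan_cons_some hm',
          pvRepl_append k v kv.2 (hval kv hmem) _,
          ih _ (by simp only [List.length_drop, List.length_cons] at *; omega)]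
      | none =>
        rw [pvScan_cons_none hm]
        by_cases hkp : k <+: c :: t
        · cases k with
          | nil => exact absurd rfl hk
          | cons a ktail =>
            rw [List.cons_prefix_cons] at hkp
            obtain ⟨rfl, hkt⟩ := hkp
            obtain ⟨r, rfl⟩ := hkt
            have htail' : ∀ ch ∈ ktail, pvNeutral kvs ch := by
              intro ch hch
              exact htail ch (by simpa using hch)
            have hm' : pvFindMatch (kvs ++ [(a :: ktail, v)]) (a :: (ktail ++ r)) =
                some (a :: ktail, v) := by
              rw [pvFindMatch_append, hm]
              simp [pvFindMatch, List.isPrefixOf_iff_prefix]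
            rw [pvScan_neutral_append kvs hkeys ktail r htail',
              pvRepl_cons_pos _ _ _ _
                (List.cons_prefix_cons.mpr ⟨rfl, List.prefix_append _ _⟩),
              pvScan_cons_some hm']
            simp only [List.length_cons, Nat.add_sub_cancel, List.drop_left]
            rw [ih r (by
              simp only [List.length_cons, List.length_append] at hs; omega)]
        · have hm' : pvFindMatch (kvs ++ [(k, v)]) (c :: t) = none := by
            rw [pvFindMatch_append, hm]
            simp [pvFindMatch, List.isPrefixOf_iff_prefix, hkp]
          rw [pvScan_cons_none hm']
          have hnp : ¬ k <+: c :: pvScan kvs t := by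
            intro hh
            cases k with
            | nil => exact hk rfl
            | cons a ktail =>
              rw [List.cons_prefix_cons] at hh
              have hkt : ktail <+: t :=
                pvScan_prefix_neutral kvs hvals t ktail
                  (fun ch hch => htail ch (by simpa using hch)) hh.2
              exact hkp (List.cons_prefix_cons.mpr ⟨hh.1, hkt⟩)
          rw [pvRepl_cons_neg _ _ _ _ hnp,
            ih t (by simp only [List.length_cons] at hs; omega)]

-- the pvStep side conditions, as a pairwise relation between an earlier and a later table entry
def pvCompat (kv₁ kv₂ : List Char × List Char) : Bool :=
  !(kv₂.1.isPrefixOf kv₁.1) && !(kv₁.1.isPrefixOf kv₂.1) &&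
  (List.range kv₁.2.length).all
    (fun j => !(kv₂.1.isPrefixOf (kv₁.2.drop j)) && !((kv₁.2.drop j).isPrefixOf kv₂.1)) &&
  (kv₂.1.drop 1).all (fun c => kv₁.1.head? != some c && kv₁.2.head? != some c)

def pvGood (kvs : List (List Char × List Char)) : Prop :=
  (∀ kv ∈ kvs, kv.1 ≠ [] ∧ kv.2 ≠ []) ∧ kvs.Pairwise (fun a b => pvCompat a b = true)

theorem pvCompat_spec {kv₁ kv₂ : List Char × List Char} (h : pvCompat kv₁ kv₂ = true) :
    (¬ (kv₂.1 <+: kv₁.1) ∧ ¬ (kv₁.1 <+: kv₂.1)) ∧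
    (∀ j < kv₁.2.length, ¬ (kv₂.1 <+: kv₁.2.drop j) ∧ ¬ (kv₁.2.drop j <+: kv₂.1)) ∧
    (∀ c ∈ kv₂.1.drop 1, kv₁.1.head? ≠ some c ∧ kv₁.2.head? ≠ some c) := by
  simp only [pvCompat, Bool.and_eq_true] at h
  obtain ⟨⟨⟨h1, h2⟩, h3⟩, h4⟩ := h
  refine ⟨⟨?_, ?_⟩, ?_, ?_⟩
  · exact fun hp => by simp [List.isPrefixOf_iff_prefix.mpr hp] at h1
  · exact fun hp => by simp [List.isPrefixOf_iff_prefix.mpr hp] at h2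
  · intro j hj
    have hj' := List.all_eq_true.mp h3 j (List.mem_range.mpr hj)
    obtain ⟨ha, hb⟩ := (Bool.and_eq_true _ _).mp hj'
    exact ⟨fun hp => by simp [List.isPrefixOf_iff_prefix.mpr hp] at ha,
           fun hp => by simp [List.isPrefixOf_iff_prefix.mpr hp] at hb⟩
  · intro c hc
    have hc' := List.all_eq_true.mp h4 c hc
    obtain ⟨ha, hb⟩ := (Bool.and_eq_true _ _).mp hc'
    exact ⟨bne_iff_ne.mp ha, bne_iff_ne.mp hb⟩

theorem pvScan_empty : ∀ s, pvScan [] s = s := by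
  intro s
  induction s with
  | nil => exact pvScan_nil []
  | cons c t ih => rw [pvScan_cons_none rfl, ih]

theorem pvFold (kvs : List (List Char × List Char)) (hgood : pvGood kvs) :
    ∀ s, kvs.foldl (fun cs kv => pvRepl kv.1 kv.2 cs) s = pvScan kvs s := by
  induction kvs using List.reverseRecOn with
  | nil => exact fun s => (pvScan_empty s).symm
  | append_singleton kvs kv ih =>
    obtain ⟨hne, hpw⟩ := hgood
    rw [List.pairwise_append] at hpw
    obtain ⟨hpw₁, _, hrel⟩ := hpw
    have hne₁ : ∀ p ∈ kvs, p.1 ≠ [] ∧ p.2 ≠ [] :=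
      fun p hp => hne p (List.mem_append_left _ hp)
    have hcomp : ∀ p ∈ kvs, pvCompat p kv = true :=
      fun p hp => hrel p hp kv (List.mem_singleton.mpr rfl)
    intro s
    rw [List.foldl_append, List.foldl_cons, List.foldl_nil, ih ⟨hne₁, hpw₁⟩ s]
    cases kv with
    | mk k v =>
      exact pvStep kvs k v
        (hne (k, v) (List.mem_append_right _ (List.mem_singleton.mpr rfl))).1
        (fun p hp => (hne₁ p hp).1) (fun p hp => (hne₁ p hp).2)
        (fun p hp => (pvCompat_spec (hcomp p hp)).1)
        (fun p hp => (pvCompat_spec (hcomp p hp)).2.1)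
        (fun c hc p hp => (pvCompat_spec (hcomp p hp)).2.2 c hc) s

theorem pvAbbrevTable_good : pvGood pvAbbrevTable := by
  unfold pvGood pvAbbrevTable
  refine ⟨by decide, ?_⟩
  decide

-- the String-level foldl of A reduces to the List-level foldl of pvRepl
theorem pvA_toList (L : List (String × String)) (hL : ∀ kv ∈ L, kv.1.toList ≠ []) :
    ∀ s : String,
      (L.foldl (fun sn kv => PySem.Str.replace sn kv.1 kv.2) s).toList =
        L.foldl (fun cs kv => pvRepl kv.1.toList kv.2.toList cs) s.toList := by
  induction L with
  | nil => intro s; rfl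
  | cons kv rest ih =>
    intro s
    have hkv : kv.1.toList ≠ [] := hL kv List.mem_cons_self
    simp only [List.foldl_cons]
    rw [ih (fun kv h => hL kv (List.mem_cons_of_mem _ h)),
      PySem.Str.toList_replace, pvReplace_eq _ _ _ hkv]

-- ===== VERDICT (by name: the statement is the Claim_ definition above) =====
theorem abbreviate_station_name_py_spec : Claim_equal_abbreviate_station_name_py := by
  intro s _
  unfold Spec_abbreviate_station_name_py
  apply String.toList_injective
  unfold abbreviate_station_name_py abbreviate_station_name_py_alt
  rw [pvA_toList _ (by decide) s, String.toList_ofList,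
    show (List.foldl (fun cs kv => pvRepl kv.1.toList kv.2.toList cs) s.toList
        [("Street", "St"), ("Lane", "Ln"), ("Court", "Ct"), ("Road", "Rd"), ("North", "N"),
         ("South", "S"), ("East", "E"), ("West", "W"), ("Thameslink", "TL")]) =
      pvAbbrevTable.foldl (fun cs kv => pvRepl kv.1 kv.2 cs) s.toList from by
        simp [pvAbbrevTable, List.foldl_cons],
    pvFold pvAbbrevTable pvAbbrevTable_good s.toList]
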